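-- pv_equiv track=rewrite | github.com/DexinLi/detector | load.py | get_iter
-- ===== SOURCE A (Python) =====
-- def get_iter(dataset, batch_size):
--     n = len(dataset)
--     res = []
--     for i in range(n // batch_size):
--         x = []
--         y = []
--         for j in range(batch_size):
--             data = dataset[i * batch_size + j]
--             x.append(data[0])
--             y.append(data[1])
--         res.append((x, y))
--     return res
-- ===== SOURCE B (Python) =====
-- def get_iter(dataset, batch_size):
--     # Consume the list chunk by chunk with slices instead of scalar index arithmetic.
--     if batch_size <= 0:
--         return []
--     res = []
--     rest = dataset
--     while len(rest) >= batch_size: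
--         batch, rest = rest[:batch_size], rest[batch_size:]
--         res.append(([d[0] for d in batch], [d[1] for d in batch]))
--     return res
-- ===== Notes on version B (the rewrite author's own statement) =====
-- stated objective: alternative
-- what changed: Replaces the doubly index-arithmetic loop (i*batch_size+j lookups) with slice-based chunk consumption: repeatedly split off the first batch_size elements of the remaining list and transpose each chunk with two comprehensions; Pre_ excludes only batch_size == 0, where A raises ZeroDivisionError.
import Mathlib
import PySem

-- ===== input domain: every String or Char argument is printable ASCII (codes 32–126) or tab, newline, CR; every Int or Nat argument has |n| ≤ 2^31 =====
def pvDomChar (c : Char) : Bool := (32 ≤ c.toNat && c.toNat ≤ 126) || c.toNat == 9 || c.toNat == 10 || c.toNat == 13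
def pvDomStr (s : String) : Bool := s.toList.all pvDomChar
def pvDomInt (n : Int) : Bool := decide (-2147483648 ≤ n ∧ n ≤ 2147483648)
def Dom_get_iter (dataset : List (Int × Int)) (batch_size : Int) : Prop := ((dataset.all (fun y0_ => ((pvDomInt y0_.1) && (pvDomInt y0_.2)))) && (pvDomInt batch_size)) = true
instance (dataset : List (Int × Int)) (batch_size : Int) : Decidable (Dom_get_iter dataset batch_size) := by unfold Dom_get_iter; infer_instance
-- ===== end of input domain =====

-- B replaces A's index-arithmetic double loop by slice-based chunk consumption (alternative decomposition, same cost).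

-- ===== PORT A =====
-- literal transliteration of A: outer loop over range(n // batch_size), inner loop over
-- range(batch_size) appending dataset[i*batch_size+j][0]/[1]; pyGetD is exact here because
-- inside Pre_ every index A reads is in range (for batch_size < 0 the outer range is empty).
def get_iter (dataset : List (Int × Int)) (batch_size : Int) : List (List Int × List Int) :=
  let n : Int := PySem.List.len dataset
  (PySem.List.pyRange 0 (PySem.Int.floordiv n batch_size) 1).foldl
    (fun res i =>
      let p := (PySem.List.pyRange 0 batch_size 1).foldl
        (fun (p : List Int × List Int) j =>
          let data := PySem.List.pyGetD dataset (i * batch_size + j) (0, 0)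
          (p.1 ++ [data.1], p.2 ++ [data.2]))
        ([], [])
      res ++ [p])
    []

-- ===== PORT B =====
-- the while loop of Source B: peel rest[:batch_size] / rest[batch_size:] while len(rest) >= batch_size;
-- for 0 < b, rest[:b] = take b and rest[b:] = drop b (PySem.List.slice_to / slice_from), exact here.
def chunkGo (b : Nat) (rest : List (Int × Int)) : List (List Int × List Int) :=
  if h : 0 < b ∧ b ≤ rest.length then
    (((rest.take b).map Prod.fst, (rest.take b).map Prod.snd)) :: chunkGo b (rest.drop b)
  else []
termination_by rest.length
decreasing_by simp; omega

def get_iter_alt (dataset : List (Int × Int)) (batch_size : Int) : List (List Int × List Int) :=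
  if batch_size ≤ 0 then [] else chunkGo batch_size.toNat dataset

-- ===== PRECONDITION & SPEC =====
-- Pre_ excludes only batch_size = 0, where A raises ZeroDivisionError.
def Pre_get_iter (dataset : List (Int × Int)) (batch_size : Int) : Prop := batch_size ≠ 0
instance (dataset : List (Int × Int)) (batch_size : Int) : Decidable (Pre_get_iter dataset batch_size) := by unfold Pre_get_iter; infer_instance
def pvWitness_get_iter : (List (Int × Int)) × Int := ([(1, 2), (3, 4), (5, 6)], 2)

def Spec_get_iter (dataset : List (Int × Int)) (batch_size : Int) (out : List (List Int × List Int)) : Prop := out = get_iter_alt dataset batch_size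
instance (dataset : List (Int × Int)) (batch_size : Int) (out : List (List Int × List Int)) : Decidable (Spec_get_iter dataset batch_size out) := by unfold Spec_get_iter; infer_instance

-- ===== CLAIM (what is proved, stated in full; the proofs are below) =====
def Claim_equal_get_iter : Prop := ∀ (dataset : List (Int × Int)) (batch_size : Int), Dom_get_iter dataset batch_size → Pre_get_iter dataset batch_size → Spec_get_iter dataset batch_size (get_iter dataset batch_size)

-- ===== LEMMAS AND PROOFS =====

-- the pair-building inner loop is two maps
theorem foldl_pair_append {α : Type} (f g : α → Int) :
    ∀ (l : List α) (a c : List Int),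
      l.foldl (fun (p : List Int × List Int) j => (p.1 ++ [f j], p.2 ++ [g j])) (a, c)
        = (a ++ l.map f, c ++ l.map g) := by
  intro l
  induction l with
  | nil => simp
  | cons x xs ih => intro a c; simp [List.foldl_cons, ih]

-- reading b consecutive elements starting at m is take b of drop m
theorem range_map_getD_eq_drop_take (b : Nat) (d : Int × Int) :
    ∀ (m : Nat) (l : List (Int × Int)), m + b ≤ l.length →
      (List.range b).map (fun k => l.getD (m + k) d) = (l.drop m).take b := by
  intro m l h
  apply List.ext_getElem
  · simp; omega
  · intro k h1 h2
    simp only [List.getElem_map, List.getElem_range, List.getElem_take, List.getElem_drop]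
    rw [List.getD_eq_getElem]

theorem chunkGo_eq_spec (b : Nat) (hb : 0 < b) :
    ∀ (l : List (Int × Int)),
      chunkGo b l = (List.range (l.length / b)).map (fun i =>
        (((l.drop (i * b)).take b).map Prod.fst, ((l.drop (i * b)).take b).map Prod.snd)) := by
  intro l
  induction hn : l.length using Nat.strong_induction_on generalizing l with
  | _ n ih =>
    subst hn
    by_cases hlen : b ≤ l.length
    · rw [chunkGo, dif_pos ⟨hb, hlen⟩]
      rw [Nat.div_eq_sub_div hb hlen, List.range_succ_eq_map]
      have hdlen : (l.drop b).length = l.length - b := by simp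
      have hshift : ∀ i : Nat, (l.drop b).drop (i * b) = l.drop ((i + 1) * b) := by
        intro i; rw [List.drop_drop]; congr 1; ring
      have hrec := ih (l.drop b).length (by omega) (l.drop b) rfl
      simp only [hshift, hdlen] at hrec
      rw [hrec]
      simp [List.map_map, Function.comp, Nat.succ_eq_add_one]
    · rw [chunkGo, dif_neg (by omega)]
      rw [Nat.div_eq_of_lt (by omega)]
      simp

-- ===== VERDICT (by name: the statement is the Claim_ definition above) =====
theorem get_iter_spec : Claim_equal_get_iter := by
  intro dataset batch_size _ hpre
  unfold Spec_get_iter get_iter get_iter_alt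
  simp only [Pre_get_iter] at hpre
  dsimp only
  simp only [PySem.List.len_eq]
  rcases lt_trichotomy batch_size 0 with hneg | hzero | hpos
  · -- batch_size < 0: n // batch_size ≤ 0, outer range empty; B's guard returns []
    rw [if_pos (le_of_lt hneg)]
    have hle : PySem.Int.floordiv ((dataset.length : Nat) : Int) batch_size ≤ 0 := by
      have h0 : (0 : Int) ≤ ((dataset.length : Nat) : Int) := Int.natCast_nonneg _
      by_contra hgt
      push Not at hgt
      have := PySem.Int.floordiv_mul_add_mod ((dataset.length : Nat) : Int) batch_size
      have hmod := PySem.Int.mod_neg_bounds (a := ((dataset.length : Nat) : Int)) (b := batch_size) hneg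
      nlinarith [hmod.1, hmod.2]
    rw [PySem.List.pyRange_one_eq_nil hle]
    simp
  · omega
  · -- batch_size > 0
    rw [if_neg (by omega)]
    obtain ⟨b, rfl⟩ : ∃ b : Nat, batch_size = (b : Int) := ⟨batch_size.toNat, by omega⟩
    have hb : 0 < b := by exact_mod_cast hpos
    rw [Int.toNat_natCast, chunkGo_eq_spec b hb]
    rw [PySem.Int.floordiv_natCast]
    simp only [PySem.List.pyRange_zero_nat, List.foldl_map]
    rw [PySem.List.foldl_append_singleton_eq_map]
    simp only [List.nil_append]
    apply List.map_congr_left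
    intro i hi
    have hiK : i < dataset.length / b := List.mem_range.mp hi
    have hbound : (i + 1) * b ≤ dataset.length := by
      calc (i + 1) * b ≤ (dataset.length / b) * b := Nat.mul_le_mul_right b hiK
        _ ≤ dataset.length := Nat.div_mul_le_self _ _
    rw [foldl_pair_append (fun k : Nat => (PySem.List.pyGetD dataset ((i : Int) * b + k) (0, 0)).1)
        (fun k : Nat => (PySem.List.pyGetD dataset ((i : Int) * b + k) (0, 0)).2)]
    have hmap : (List.range b).map (fun k : Nat => PySem.List.pyGetD dataset ((i : Int) * b + k) (0, 0))
        = (dataset.drop (i * b)).take b := by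
      calc (List.range b).map (fun k : Nat => PySem.List.pyGetD dataset ((i : Int) * b + k) (0, 0))
          = (List.range b).map (fun k => dataset.getD (i * b + k) (0, 0)) := by
            apply List.map_congr_left; intro k _
            rw [show ((i : Int) * b + k) = ((i * b + k : Nat) : Int) by push_cast; ring,
              PySem.List.pyGetD_natCast]
        _ = (dataset.drop (i * b)).take b := by
            apply range_map_getD_eq_drop_take
            have : i * b + b = (i + 1) * b := by ring
            omega
    simp only [List.nil_append]
    rw [← hmap]
    simp [List.map_map, Function.comp]
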